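-- pv_equiv track=rewrite | github.com/madr/julkalendern | 2020-python/solutions/day_08.py | alter
-- ===== SOURCE A (Python) =====
-- def alter(instructions, offset):
--     il = len(instructions)
--     invalid_changes = [0, il, -il]
--     dont = "DO_NOT_ALTER"
--
--     def sanitize(instruction):
--         op, change = instruction
--         if op == "nop" and change in invalid_changes:
--             return (dont, change)
--         return (op, change)
--
--     change_range = [op for op, _change in map(sanitize, instructions[offset:])]
--     try:
--         first_jmp = change_range.index("jmp")
--     except ValueError:
--         first_jmp = il - offset - 1
--     try:
--         first_nop = change_range.index("nop")
--     except ValueError: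
--         first_nop = il - offset - 1
--     change_at = offset + min(first_nop, first_jmp)
--     altered = [*instructions]
--     old_op, change = altered[change_at]
--     new_op = "jmp" if old_op == "nop" else "nop"
--     altered[change_at] = (new_op, change)
--     return altered, change_at + 1
-- ===== SOURCE B (Python) =====
-- def alter(instructions, offset):
--     il = len(instructions)
--     change_at = il - 1
--     for i in range(offset, il):
--         op, change = instructions[i]
--         if op == "jmp" or (op == "nop" and change not in (0, il, -il)):
--             change_at = i
--             break
--     altered = list(instructions)
--     old_op, change = altered[change_at]
--     altered[change_at] = ("jmp" if old_op == "nop" else "nop", change)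
--     return altered, change_at + 1
-- ===== Notes on version B (the rewrite author's own statement) =====
-- stated objective: simpler
-- what changed: Replaces the sanitized op-name list, the two .index scans and the min with a single indexed loop that stops at the first flippable instruction; Pre_ excludes the empty list (A raises) and negative offsets, where A's value comes from Python's negative slice/index wraparound.
-- outside the precondition, e.g. on alter([('A', 0)], -2): A returns ([('nop', 0)], 1), B raises IndexError
import Mathlib
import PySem

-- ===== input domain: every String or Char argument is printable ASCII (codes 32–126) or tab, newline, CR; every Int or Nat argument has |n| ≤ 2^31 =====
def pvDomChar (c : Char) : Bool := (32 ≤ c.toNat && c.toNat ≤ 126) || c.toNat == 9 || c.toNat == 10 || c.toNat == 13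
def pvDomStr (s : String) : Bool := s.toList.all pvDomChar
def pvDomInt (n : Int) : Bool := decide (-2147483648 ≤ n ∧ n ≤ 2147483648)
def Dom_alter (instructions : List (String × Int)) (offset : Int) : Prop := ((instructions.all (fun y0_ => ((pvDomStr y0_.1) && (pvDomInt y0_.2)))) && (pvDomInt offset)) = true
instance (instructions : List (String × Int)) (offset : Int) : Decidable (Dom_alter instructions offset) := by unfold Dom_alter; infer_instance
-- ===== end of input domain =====

-- B replaces the sanitized-op list, the two .index scans and the min with one
-- indexed loop that stops at the first flippable instruction (objective: simpler).

-- ===== PORT A =====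
def alter (instructions : List (String × Int)) (offset : Int) : (List (String × Int)) × Int :=
  let il : Int := instructions.length
  let invalidChanges : List Int := [0, il, -il]
  let dont : String := "DO_NOT_ALTER"
  let sanitize : String × Int → String × Int := fun p =>
    if p.1 = "nop" ∧ p.2 ∈ invalidChanges then (dont, p.2) else (p.1, p.2)
  let changeRange : List String :=
    ((PySem.List.slice instructions (some offset) none).map sanitize).map Prod.fst
  let firstJmp : Int :=
    match PySem.List.index? changeRange "jmp" with
    | some i => (i : Int)
    | none => il - offset - 1
  let firstNop : Int :=
    match PySem.List.index? changeRange "nop" with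
    | some i => (i : Int)
    | none => il - offset - 1
  let changeAt : Int := offset + min firstNop firstJmp
  match PySem.List.pyGet? instructions changeAt with
  | none => (instructions, changeAt + 1)   -- IndexError in Python; excluded by Pre_
  | some (oldOp, change) =>
      let newOp : String := if oldOp = "nop" then "jmp" else "nop"
      (PySem.List.pySetD instructions changeAt (newOp, change), changeAt + 1)

-- ===== PORT B =====
-- the for-loop of Source B with its break: first index in range(offset, il) whose
-- instruction is flippable, else il - 1
def alterFind (instructions : List (String × Int)) (il : Int) : List Int → Int
  | [] => il - 1
  | i :: rest =>
      let p := PySem.List.pyGetD instructions i ("", 0)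
      if p.1 = "jmp" ∨ (p.1 = "nop" ∧ p.2 ∉ ([0, il, -il] : List Int)) then i
      else alterFind instructions il rest

def alter_alt (instructions : List (String × Int)) (offset : Int) : (List (String × Int)) × Int :=
  let il : Int := instructions.length
  let changeAt : Int := alterFind instructions il (PySem.List.pyRange offset il 1)
  match PySem.List.pyGet? instructions changeAt with
  | none => (instructions, changeAt + 1)
  | some (oldOp, change) =>
      let newOp : String := if oldOp = "nop" then "jmp" else "nop"
      (PySem.List.pySetD instructions changeAt (newOp, change), changeAt + 1)

-- ===== PRECONDITION & SPEC =====
-- Pre_ excludes the empty list (A raises IndexError there) and negative offsets,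
-- on which A's returned value and index come from Python's negative-slice and
-- negative-index wraparound, an artefact of A's implementation.
def Pre_alter (instructions : List (String × Int)) (offset : Int) : Prop :=
  instructions ≠ [] ∧ 0 ≤ offset
instance (instructions : List (String × Int)) (offset : Int) : Decidable (Pre_alter instructions offset) := by unfold Pre_alter; infer_instance

def pvWitness_alter : (List (String × Int)) × Int := ([("nop", 3), ("jmp", 1)], 0)

def Spec_alter (instructions : List (String × Int)) (offset : Int) (out : (List (String × Int)) × Int) : Prop := out = alter_alt instructions offset
instance (instructions : List (String × Int)) (offset : Int) (out : (List (String × Int)) × Int) : Decidable (Spec_alter instructions offset out) := by unfold Spec_alter; infer_instance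

-- ===== CLAIM (what is proved, stated in full; the proofs are below) =====
def Claim_equal_alter : Prop := ∀ (instructions : List (String × Int)) (offset : Int), Dom_alter instructions offset → Pre_alter instructions offset → Spec_alter instructions offset (alter instructions offset)

-- ===== LEMMAS AND PROOFS =====

-- an instruction is flippable
abbrev pvGood (il : Int) (p : String × Int) : Prop :=
  p.1 = "jmp" ∨ (p.1 = "nop" ∧ p.2 ∉ ([0, il, -il] : List Int))

-- A's sanitize helper, named for the proofs
def pvSan (il : Int) (p : String × Int) : String × Int :=
  if p.1 = "nop" ∧ p.2 ∈ ([0, il, -il] : List Int) then ("DO_NOT_ALTER", p.2) else (p.1, p.2)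

theorem pv_matchIdx (o : Option Nat) (M : Int) :
    (match o with | some i => (i : Int) | none => M) = (o.map Int.ofNat).getD M := by
  cases o <;> rfl

-- A's min of the two first indices over the sanitized op list = first flippable index
theorem pv_A_core (il : Int) (l : List (String × Int)) (M : Int)
    (hM : M = (l.length : Int) - 1) :
    min (((PySem.List.index? ((l.map (pvSan il)).map Prod.fst) "nop").map Int.ofNat).getD M)
        (((PySem.List.index? ((l.map (pvSan il)).map Prod.fst) "jmp").map Int.ofNat).getD M)
      = ((l.findIdx? (fun p => decide (pvGood il p))).map Int.ofNat).getD M := by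
  induction l generalizing M with
  | nil => simp [PySem.List.index?_eq_idxOf?]
  | cons p rest ih =>
    have hM' : M = (rest.length : Int) := by simp at hM; omega
    rw [List.map_cons, List.map_cons, List.findIdx?_cons]
    by_cases hg : pvGood il p
    · have hd1 : decide (pvGood il p) = true := by simp [hg]
      rw [if_pos hd1]
      rcases hg with h | ⟨h1, h2⟩
      · have hop : (pvSan il p).1 = "jmp" := by simp [pvSan, h]
        rw [hop, PySem.List.index?_cons_self,
            PySem.List.index?_cons_of_ne _ (show ("jmp" : String) ≠ "nop" by decide)]
        rcases hidx : PySem.List.index? ((rest.map (pvSan il)).map Prod.fst) "nop" with _ | k <;>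
          simp only [Option.map_some, Option.map_none, Option.getD_some, Option.getD_none, Int.ofNat_eq_natCast] <;>
          omega
      · have hop : (pvSan il p).1 = "nop" := by simp [pvSan, h1, h2]
        rw [hop, PySem.List.index?_cons_self,
            PySem.List.index?_cons_of_ne _ (show ("nop" : String) ≠ "jmp" by decide)]
        rcases hidx : PySem.List.index? ((rest.map (pvSan il)).map Prod.fst) "jmp" with _ | k <;>
          simp only [Option.map_some, Option.map_none, Option.getD_some, Option.getD_none, Int.ofNat_eq_natCast] <;>
          omega
    · have hd0 : decide (pvGood il p) = false := by simp [hg]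
      rw [if_neg (by simp [hd0])]
      have hop : (pvSan il p).1 ≠ "jmp" ∧ (pvSan il p).1 ≠ "nop" := by
        unfold pvSan
        by_cases hn : p.1 = "nop" ∧ p.2 ∈ ([0, il, -il] : List Int)
        · simp [hn]
        · have ha : p.1 ≠ "jmp" := fun h => hg (Or.inl h)
          have hb : p.1 ≠ "nop" := fun h => hn ⟨h, by_contra fun hc => hg (Or.inr ⟨h, hc⟩)⟩
          simp [hn, ha, hb]
      rw [PySem.List.index?_cons_of_ne _ hop.2, PySem.List.index?_cons_of_ne _ hop.1]
      have key := ih (M - 1) (by omega)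
      rcases h1 : PySem.List.index? ((rest.map (pvSan il)).map Prod.fst) "nop" with _ | k1 <;>
      rcases h2 : PySem.List.index? ((rest.map (pvSan il)).map Prod.fst) "jmp" with _ | k2 <;>
      rcases h3 : rest.findIdx? (fun p => decide (pvGood il p)) with _ | k3 <;>
      rw [h1, h2, h3] at key <;>
      simp only [Option.map_some, Option.map_none, Option.getD_some, Option.getD_none, Int.ofNat_eq_natCast] at key ⊢ <;>
      push_cast at key ⊢ <;> omega

-- B's loop over range(n, il) finds the first flippable index ≥ n (fallback il - 1)
theorem pv_B_core (instructions : List (String × Int)) :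
    ∀ (l : List (String × Int)) (n : Nat), instructions.drop n = l →
    alterFind instructions (instructions.length : Int)
        (PySem.List.pyRange (n : Int) (instructions.length : Int) 1)
      = ((l.findIdx? (fun p => decide (pvGood (instructions.length : Int) p))).map
          (fun k => (n : Int) + Int.ofNat k)).getD ((instructions.length : Int) - 1) := by
  intro l
  induction l with
  | nil =>
    intro n hd
    have hlen : instructions.length ≤ n := by
      by_contra h
      have := (List.drop_eq_nil_iff).mp hd
      omega
    have hr : PySem.List.pyRange (n : Int) (instructions.length : Int) 1 = [] := by
      simp [PySem.List.pyRange]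
      omega
    rw [hr]
    simp [alterFind]
  | cons p rest ih =>
    intro n hd
    have hn : n < instructions.length := by
      by_contra h
      rw [List.drop_eq_nil_iff.mpr (by omega)] at hd
      exact absurd hd (by simp)
    have hget : instructions[n]? = some p := by
      have := congrArg (fun xs => xs.head?) hd
      simpa [List.head?_drop] using this
    have hrange : PySem.List.pyRange (n : Int) (instructions.length : Int) 1
        = (n : Int) :: PySem.List.pyRange ((n : Int) + 1) (instructions.length : Int) 1 :=
      PySem.List.pyRange_one_cons (by exact_mod_cast hn)
    rw [hrange]
    have hgetD : PySem.List.pyGetD instructions (n : Int) ("", 0) = p := by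
      rw [PySem.List.pyGetD_natCast]
      simp [List.getD_eq_getElem?_getD, hget]
    simp only [alterFind, hgetD, List.findIdx?_cons]
    by_cases hg : pvGood (instructions.length : Int) p
    · have hcond : p.1 = "jmp" ∨ (p.1 = "nop" ∧
          p.2 ∉ ([0, (instructions.length : Int), -(instructions.length : Int)] : List Int)) := hg
      have hd1 : decide (pvGood (instructions.length : Int) p) = true := by simp [hg]
      rw [if_pos hcond, if_pos hd1]
      simp only [Option.map_some, Option.getD_some, Int.ofNat_eq_natCast]
      omega
    · have hd0 : decide (pvGood (instructions.length : Int) p) = false := by simp [hg]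
      have hcond : ¬ (p.1 = "jmp" ∨ (p.1 = "nop" ∧
          p.2 ∉ ([0, (instructions.length : Int), -(instructions.length : Int)] : List Int))) := hg
      rw [if_neg hcond, if_neg (by simp [hd0])]
      have key := ih (n + 1) (by rw [← List.drop_drop]; rw [hd]; simp)
      push_cast at key
      rw [key]
      rcases h3 : rest.findIdx? (fun p => decide (pvGood (instructions.length : Int) p)) with _ | k3 <;>
        simp only [Option.map_some, Option.map_none, Option.getD_some, Option.getD_none, Int.ofNat_eq_natCast] <;>
        push_cast <;> omega

-- the two computed change_at indices agree
theorem pv_changeAt_eq (instructions : List (String × Int)) (offset : Int)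
    (h0 : 0 ≤ offset) :
    (offset + min
      (match PySem.List.index? (((PySem.List.slice instructions (some offset) none).map (fun p =>
          if p.1 = "nop" ∧ p.2 ∈ ([0, (instructions.length : Int), -(instructions.length : Int)] : List Int)
          then ("DO_NOT_ALTER", p.2) else (p.1, p.2))).map Prod.fst) "nop" with
       | some i => (i : Int) | none => (instructions.length : Int) - offset - 1)
      (match PySem.List.index? (((PySem.List.slice instructions (some offset) none).map (fun p =>
          if p.1 = "nop" ∧ p.2 ∈ ([0, (instructions.length : Int), -(instructions.length : Int)] : List Int)
          then ("DO_NOT_ALTER", p.2) else (p.1, p.2))).map Prod.fst) "jmp" with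
       | some i => (i : Int) | none => (instructions.length : Int) - offset - 1))
    = alterFind instructions (instructions.length : Int)
        (PySem.List.pyRange offset (instructions.length : Int) 1) := by
  obtain ⟨n, rfl⟩ : ∃ n : Nat, offset = (n : Int) := ⟨offset.toNat, by omega⟩
  have hsl : PySem.List.slice instructions (some ((n : Nat) : Int)) none = instructions.drop n := by
    rw [PySem.List.slice_from instructions (by omega)]
    simp
  have hfun : (fun p : String × Int =>
      if p.1 = "nop" ∧ p.2 ∈ ([0, (instructions.length : Int), -(instructions.length : Int)] : List Int)
      then ("DO_NOT_ALTER", p.2) else (p.1, p.2)) = pvSan (instructions.length : Int) := rfl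
  rw [pv_matchIdx, pv_matchIdx, hsl, hfun]
  rw [pv_B_core instructions (instructions.drop n) n rfl]
  by_cases hle : n ≤ instructions.length
  · rw [pv_A_core (instructions.length : Int) (instructions.drop n)
        ((instructions.length : Int) - (n : Int) - 1)
        (by simp [List.length_drop]; omega)]
    rcases h3 : (instructions.drop n).findIdx?
        (fun p => decide (pvGood (instructions.length : Int) p)) with _ | k3 <;>
      simp only [Option.map_some, Option.map_none, Option.getD_some, Option.getD_none, Int.ofNat_eq_natCast] <;>
      push_cast <;> omega
  · have hnil : instructions.drop n = [] := List.drop_eq_nil_iff.mpr (by omega)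
    rw [hnil]
    simp [PySem.List.index?_eq_idxOf?, min_self]
    omega

-- ===== VERDICT (by name: the statement is the Claim_ definition above) =====
theorem alter_spec : Claim_equal_alter := by
  intro instructions offset _hdom hpre
  unfold Spec_alter
  simp only [alter, alter_alt]
  rw [pv_changeAt_eq instructions offset hpre.2]
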